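-- pv_equiv track=rewrite | github.com/lam2lam/quad_tbl_comp | analyze.py | compute_segmented_dod_cost
-- ===== SOURCE A (Python) =====
-- import math
-- from typing import List, Tuple, Optional
--
-- def bit_cost(values: List[int]) -> int:
--     """Compute bits required to store a list of signed integers."""
--     if not values:
--         return 0
--     max_abs = max(abs(v) for v in values)
--     if max_abs == 0:
--         return 1
--     return math.ceil(math.log2(max_abs + 1))
--
-- def compute_segmented_dod_cost(column: List[int], seg_size: int) -> int:
--     """
--     Compute cost for segmented diff-of-diffs algorithm.
--     Each segment has its own anchor and first_diff.
--     """
--     n = len(column)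
--     total_cost = 0
--
--     for seg_start in range(0, n, seg_size):
--         seg_end = min(seg_start + seg_size, n)
--         segment = column[seg_start:seg_end]
--
--         if len(segment) == 0:
--             continue
--         elif len(segment) == 1:
--             total_cost += bit_cost([segment[0]])
--         else:
--             anchor_bits = bit_cost([segment[0]])
--             diff_bits = bit_cost([segment[1] - segment[0]])
--
--             dods = []
--             for i in range(2, len(segment)):
--                 d1 = segment[i] - segment[i-1]
--                 d0 = segment[i-1] - segment[i-2]
--                 dods.append(d1 - d0)
--
--             if dods:
--                 dod_bw = bit_cost(dods)
--                 dod_cost = dod_bw * len(dods)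
--             else:
--                 dod_cost = 0
--
--             total_cost += anchor_bits + diff_bits + dod_cost
--
--     return total_cost
-- ===== SOURCE B (Python) =====
-- def compute_segmented_dod_cost(column, seg_size):
--     """Streaming single pass over column: per-segment running state (anchor,
--     first-diff cost, running max |dod| and dod count) flushed at each segment
--     boundary, instead of slicing segments and rescanning them."""
--     def cost1(m):
--         # bits for signed magnitude m >= 0
--         return 1 if m == 0 else m.bit_length()
--
--     total = 0
--     pos = 0
--     first = diffc = maxdod = cnt = prev = prev2 = 0
--     has_diff = False
--     for x in column:
--         if pos == 0:
--             first = x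
--             has_diff = False
--             maxdod = 0
--             cnt = 0
--         elif pos == 1:
--             diffc = cost1(abs(x - prev))
--             has_diff = True
--         else:
--             dod = abs(x - 2 * prev + prev2)
--             if dod > maxdod:
--                 maxdod = dod
--             cnt += 1
--         prev2 = prev
--         prev = x
--         pos += 1
--         if pos == seg_size:
--             total += cost1(abs(first)) + (diffc if has_diff else 0) \
--                      + (cost1(maxdod) * cnt if cnt else 0)
--             pos = 0
--     if pos:
--         total += cost1(abs(first)) + (diffc if has_diff else 0) \
--                  + (cost1(maxdod) * cnt if cnt else 0)
--     return total
-- ===== Notes on version B (the rewrite author's own statement) =====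
-- stated objective: alternative
-- what changed: Replaced the segment-slicing outer loop with inner rescans (slice, per-segment dods list, bit_cost via float log2) by a single streaming pass over column that keeps per-segment state (anchor, first-diff cost, running max |dod| and dod count) and flushes it at each segment boundary, using integer bit_length instead of float log2.
-- outside the precondition, e.g. on compute_segmented_dod_cost([1, 2, 3], -1): A returns 0, B returns 3
import Mathlib
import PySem

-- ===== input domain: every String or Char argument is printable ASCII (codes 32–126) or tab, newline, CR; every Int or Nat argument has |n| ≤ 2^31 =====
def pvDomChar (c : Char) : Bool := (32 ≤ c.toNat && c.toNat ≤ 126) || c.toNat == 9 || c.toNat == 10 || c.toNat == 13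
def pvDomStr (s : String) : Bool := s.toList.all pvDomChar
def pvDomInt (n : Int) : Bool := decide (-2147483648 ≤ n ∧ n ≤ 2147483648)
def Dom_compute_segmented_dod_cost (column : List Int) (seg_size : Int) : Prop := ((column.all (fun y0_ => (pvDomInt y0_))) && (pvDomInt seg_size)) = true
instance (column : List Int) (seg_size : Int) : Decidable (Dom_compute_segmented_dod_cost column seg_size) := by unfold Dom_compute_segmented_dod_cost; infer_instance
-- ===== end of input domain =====

-- B replaces A's segment-slicing loop (slice + per-segment dods list + float-log2 bit_cost)
-- by one streaming pass with per-segment state flushed at each boundary (integer bit_length).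


-- ===== PORT A =====

-- math.ceil(math.log2 x) for an integer x ≥ 2, ported as the exact integer ceiling log2;
-- exact here: at the magnitudes Dom admits (< 2^34) A's float computation is error-free.
def pyCeilLog2 (x : Int) : Int := ((x - 1).toNat.log2 + 1 : Nat)

def bit_cost (values : List Int) : Int :=
  match values with
  | [] => 0
  | v :: vs =>
      -- max(abs(v) for v in values) on the nonempty list
      let max_abs := vs.foldl (fun m w => max m |w|) |v|
      if max_abs = 0 then 1 else pyCeilLog2 (max_abs + 1)

-- indices fed to pyGetD are always in range here, so the default 0 is never used
def compute_segmented_dod_cost (column : List Int) (seg_size : Int) : Int :=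
  let n : Int := column.length
  (PySem.List.pyRange 0 n seg_size).foldl (fun total_cost seg_start =>
    let seg_end := min (seg_start + seg_size) n
    let segment := PySem.List.slice column (some seg_start) (some seg_end)
    if segment.length = 0 then total_cost
    else if segment.length = 1 then
      total_cost + bit_cost [PySem.List.pyGetD segment 0 0]
    else
      let anchor_bits := bit_cost [PySem.List.pyGetD segment 0 0]
      let diff_bits := bit_cost [PySem.List.pyGetD segment 1 0 - PySem.List.pyGetD segment 0 0]
      let dods := (PySem.List.pyRange 2 (segment.length : Int)).foldl (fun ds i =>
        let d1 := PySem.List.pyGetD segment i 0 - PySem.List.pyGetD segment (i-1) 0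
        let d0 := PySem.List.pyGetD segment (i-1) 0 - PySem.List.pyGetD segment (i-2) 0
        ds ++ [d1 - d0]) []
      let dod_cost := if dods ≠ [] then bit_cost dods * (dods.length : Int) else 0
      total_cost + anchor_bits + diff_bits + dod_cost) 0

-- ===== PORT B =====

def cost1 (m : Int) : Int := if m = 0 then 1 else (PySem.Int.bitLength m : Int)

structure BSt where
  total : Int
  pos : Int
  first : Int
  diffc : Int
  maxdod : Int
  cnt : Int
  prev : Int
  prev2 : Int
  has_diff : Bool
deriving Repr, DecidableEq

def bFlush (st : BSt) : Int :=
  st.total + cost1 |st.first| + (if st.has_diff then st.diffc else 0)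
    + (if st.cnt ≠ 0 then cost1 st.maxdod * st.cnt else 0)

def bStep (seg_size : Int) (st : BSt) (x : Int) : BSt :=
  let st1 :=
    if st.pos = 0 then { st with first := x, has_diff := false, maxdod := 0, cnt := 0 }
    else if st.pos = 1 then { st with diffc := cost1 |x - st.prev|, has_diff := true }
    else
      let dod := |x - 2 * st.prev + st.prev2|
      { st with maxdod := if dod > st.maxdod then dod else st.maxdod, cnt := st.cnt + 1 }
  let st2 := { st1 with prev2 := st1.prev, prev := x, pos := st1.pos + 1 }
  if st2.pos = seg_size then { st2 with total := bFlush st2, pos := 0 } else st2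

def compute_segmented_dod_cost_alt (column : List Int) (seg_size : Int) : Int :=
  let fin := column.foldl (bStep seg_size) ⟨0, 0, 0, 0, 0, 0, 0, 0, false⟩
  if fin.pos ≠ 0 then bFlush fin else fin.total

-- ===== PRECONDITION & SPEC =====

-- Pre_ excludes seg_size ≤ 0: at seg_size == 0 A raises ValueError from range, and for a
-- negative seg_size A's empty range returns 0 — a meaningless segment size outside the
-- natural domain (B streams the whole column as one segment there).
def Pre_compute_segmented_dod_cost (column : List Int) (seg_size : Int) : Prop := 1 ≤ seg_size
instance (column : List Int) (seg_size : Int) : Decidable (Pre_compute_segmented_dod_cost column seg_size) := by unfold Pre_compute_segmented_dod_cost; infer_instance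

def pvWitness_compute_segmented_dod_cost : List Int × Int := ([3, 1, 4, 1, 5], 2)

def Spec_compute_segmented_dod_cost (column : List Int) (seg_size : Int) (out : Int) : Prop := out = compute_segmented_dod_cost_alt column seg_size
instance (column : List Int) (seg_size : Int) (out : Int) : Decidable (Spec_compute_segmented_dod_cost column seg_size out) := by unfold Spec_compute_segmented_dod_cost; infer_instance

-- ===== CLAIM (what is proved, stated in full; the proofs are below) =====
def Claim_equal_compute_segmented_dod_cost : Prop := ∀ (column : List Int) (seg_size : Int), Dom_compute_segmented_dod_cost column seg_size → Pre_compute_segmented_dod_cost column seg_size → Spec_compute_segmented_dod_cost column seg_size (compute_segmented_dod_cost column seg_size)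

-- ===== LEMMAS AND PROOFS =====

-- maximum of |v| over a list, 0 for []
def maxAbs : List Int → Int
  | [] => 0
  | v :: vs => vs.foldl (fun m w => max m |w|) |v|

-- the diff-of-diffs list of the segment a :: b :: t
def segDods : Int → Int → List Int → List Int
  | _, _, [] => []
  | a, b, c :: t => (c - 2 * b + a) :: segDods b c t

-- per-segment cost (the common denominator of both programs)
def segCost : List Int → Int
  | [] => 0
  | [a] => cost1 |a|
  | a :: b :: t =>
      let dods := segDods a b t
      cost1 |a| + cost1 |b - a| +
        (if dods = [] then 0 else cost1 (maxAbs dods) * (dods.length : Int))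

-- cost of the column split into chunks of size s+1
def chunkSum (s : Nat) : List Int → Int
  | [] => 0
  | x :: t => segCost (x :: t.take s) + chunkSum s (t.drop s)
termination_by l => l.length
decreasing_by simp

-- --- bit-width arithmetic ---

theorem bitLength_eq_log2 (m : Nat) (h : 1 ≤ m) :
    PySem.Int.bitLength (m : Int) = Nat.log2 m + 1 := by
  induction m using Nat.strong_induction_on with
  | _ m ih =>
    rcases Nat.lt_or_ge m 2 with h2 | h2
    · interval_cases m
      · decide
    · rw [PySem.Int.bitLength_natCast (by omega), ih (m / 2) (by omega) (by omega),
        Nat.log2_eq_log_two, Nat.log2_eq_log_two, Nat.log_div_base 2 m]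
      have := Nat.log_pos (b := 2) (by omega) h2
      omega

theorem cost1_eq_bit (m : Int) (hm : 0 ≤ m) :
    cost1 m = if m = 0 then 1 else pyCeilLog2 (m + 1) := by
  unfold cost1 pyCeilLog2
  split_ifs with h
  · rfl
  · have h1 : 1 ≤ m.toNat := by omega
    have : m = (m.toNat : Int) := by omega
    rw [this, bitLength_eq_log2 m.toNat h1]
    have : ((m.toNat : Int) + 1 - 1).toNat = m.toNat := by omega
    rw [this]

theorem maxAbs_nonneg_aux (vs : List Int) : ∀ m : Int, 0 ≤ m →
    0 ≤ vs.foldl (fun m w => max m |w|) m := by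
  induction vs with
  | nil => intro m hm; simpa using hm
  | cons v vs ih =>
    intro m hm
    exact ih _ (le_trans hm (le_max_left _ _))

theorem maxAbs_nonneg (l : List Int) : 0 ≤ maxAbs l := by
  cases l with
  | nil => simp [maxAbs]
  | cons v vs => exact maxAbs_nonneg_aux vs _ (abs_nonneg v)

theorem bit_cost_eq_cost1 (v : Int) (vs : List Int) :
    bit_cost (v :: vs) = cost1 (maxAbs (v :: vs)) := by
  rw [cost1_eq_bit _ (maxAbs_nonneg (v :: vs))]
  rfl

theorem bit_cost_singleton (v : Int) : bit_cost [v] = cost1 |v| := by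
  rw [bit_cost_eq_cost1]; rfl

-- --- the dods list of a segment ---

theorem dods_getD (a b : Int) (t : List Int) :
    (List.range t.length).map (fun k =>
      ((a::b::t).getD (k+2) 0 - (a::b::t).getD (k+1) 0) -
      ((a::b::t).getD (k+1) 0 - (a::b::t).getD k 0)) = segDods a b t := by
  induction t generalizing a b with
  | nil => simp [segDods]
  | cons c t ih =>
    rw [List.length_cons, List.range_succ_eq_map]
    simp only [List.map_cons, List.map_map]
    rw [segDods]
    congr 1
    · simp; ring
    · rw [← ih b c]
      apply List.map_congr_left
      intro k _
      simp [Function.comp, List.getD_cons_succ]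

theorem segDods_length (a b : Int) (t : List Int) :
    (segDods a b t).length = t.length := by
  induction t generalizing a b with
  | nil => rfl
  | cons c t ih => simp [segDods, ih]

-- --- A's per-segment contribution is segCost ---

theorem perSeg (acc : Int) (seg : List Int) :
    (if seg.length = 0 then acc
     else if seg.length = 1 then acc + bit_cost [PySem.List.pyGetD seg 0 0]
     else
       let anchor_bits := bit_cost [PySem.List.pyGetD seg 0 0]
       let diff_bits := bit_cost [PySem.List.pyGetD seg 1 0 - PySem.List.pyGetD seg 0 0]
       let dods := (PySem.List.pyRange 2 (seg.length : Int)).foldl (fun ds i =>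
         let d1 := PySem.List.pyGetD seg i 0 - PySem.List.pyGetD seg (i-1) 0
         let d0 := PySem.List.pyGetD seg (i-1) 0 - PySem.List.pyGetD seg (i-2) 0
         ds ++ [d1 - d0]) []
       let dod_cost := if dods ≠ [] then bit_cost dods * (dods.length : Int) else 0
       acc + anchor_bits + diff_bits + dod_cost) = acc + segCost seg := by
  match seg with
  | [] => simp [segCost]
  | [a] =>
      have h0 : PySem.List.pyGetD [a] 0 0 = a := by simp [PySem.List.pyGetD_ofNat']
      simp [segCost, h0, bit_cost_singleton]
  | a :: b :: t =>
      rw [if_neg (by simp), if_neg (by simp)]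
      dsimp only
      rw [PySem.List.foldl_append_singleton_eq_map]
      have hcnt : (if (2:Int) < ((a::b::t).length : Int)
          then ((((a::b::t).length : Int) - 2 + 1 - 1) / 1).toNat else 0) = t.length := by
        simp only [List.length_cons]
        push_cast
        split_ifs with h
        · simp only [Int.ediv_one]
          omega
        · omega
      have hrange : PySem.List.pyRange 2 ((a::b::t).length : Int) =
          (List.range t.length).map (fun (k : Nat) => (2:Int) + 1 * (k : Int)) := by
        rw [PySem.List.pyRange_of_pos _ _ (by norm_num : (0:Int) < 1), hcnt]
      rw [hrange, List.map_map, List.nil_append]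
      have hmap : (List.range t.length).map
          ((fun i => (PySem.List.pyGetD (a::b::t) i 0 - PySem.List.pyGetD (a::b::t) (i-1) 0) -
            (PySem.List.pyGetD (a::b::t) (i-1) 0 - PySem.List.pyGetD (a::b::t) (i-2) 0)) ∘
            (fun (k : Nat) => (2:Int) + 1 * (k : Int))) = segDods a b t := by
        rw [← dods_getD a b t]
        apply List.map_congr_left
        intro k _
        have e2 : (2 + 1 * (k:Int)) = ((k+2 : Nat) : Int) := by push_cast; ring
        have e1 : ((k+2 : Nat) : Int) - 1 = ((k+1 : Nat) : Int) := by push_cast; ring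
        have e0 : ((k+2 : Nat) : Int) - 2 = ((k : Nat) : Int) := by push_cast; ring
        simp only [Function.comp, e2, e1, e0, PySem.List.pyGetD_natCast]
      rw [hmap, segCost]
      have h0 : PySem.List.pyGetD (a::b::t) 0 0 = a := by simp [PySem.List.pyGetD_ofNat']
      have h1 : PySem.List.pyGetD (a::b::t) 1 0 = b := by simp [PySem.List.pyGetD_ofNat']
      rw [h0, h1, bit_cost_singleton, bit_cost_singleton]
      rcases h : segDods a b t with _ | ⟨d, ds⟩
      · simp
        ring
      · rw [if_pos (by simp), if_neg (by simp), bit_cost_eq_cost1]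
        ring

-- --- chunkSum equations ---

theorem chunkSum_nil (s : Nat) : chunkSum s [] = 0 := by
  rw [chunkSum]

theorem chunkSum_cons (s : Nat) (x : Int) (t : List Int) :
    chunkSum s (x :: t) = segCost (x :: t.take s) + chunkSum s (t.drop s) := by
  rw [chunkSum]

-- --- A's fold as a chunk sum ---

theorem slice_chunk (s k : Nat) (l : List Int) :
    PySem.List.slice l (some (((s+1)*k : Nat) : Int))
      (some (min ((((s+1)*k : Nat) : Int) + ((s+1 : Nat) : Int)) (l.length : Int)))
    = (l.drop ((s+1)*k)).take (s+1) := by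
  rw [← Nat.cast_add, ← Nat.cast_min, PySem.List.slice_natCast]
  apply List.take_eq_take_iff.mpr
  simp only [List.length_drop]
  omega

theorem range_chunk (s : Nat) : ∀ (n : Nat) (l : List Int), l.length ≤ n →
    ((List.range ((l.length + s) / (s+1))).map
      (fun k => segCost ((l.drop ((s+1)*k)).take (s+1)))).sum = chunkSum s l := by
  intro n
  induction n with
  | zero =>
    intro l hl
    have hnil : l = [] := by cases l <;> simp_all
    subst hnil
    rw [show (([] : List Int).length + s) = s by simp,
      Nat.div_eq_of_lt (Nat.lt_succ_self s)]
    simp [chunkSum_nil]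
  | succ n ih =>
    intro l hl
    rcases l with _ | ⟨x, t⟩
    · rw [show (([] : List Int).length + s) = s by simp,
        Nat.div_eq_of_lt (Nat.lt_succ_self s)]
      simp [chunkSum_nil]
    · have hN : ((x :: t).length + s) / (s+1) = (t.length - s + s) / (s+1) + 1 := by
        have e : (x :: t).length + s = t.length + (s+1) := by simp; omega
        rw [e, Nat.add_div_right _ (Nat.succ_pos s)]
        rcases Nat.lt_or_ge t.length (s+1) with h | h
        · rw [Nat.div_eq_of_lt h, show t.length - s + s = s by omega,
            Nat.div_eq_of_lt (Nat.lt_succ_self s)]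
        · congr 2
          omega
      rw [hN, List.range_succ_eq_map, List.map_cons, List.sum_cons]
      have hhead : ((x :: t).drop ((s+1)*0)).take (s+1) = x :: t.take s := by
        simp
      rw [hhead, List.map_map]
      have hcomp : ((fun k => segCost (((x :: t).drop ((s+1)*k)).take (s+1))) ∘ Nat.succ)
          = fun k => segCost (((t.drop s).drop ((s+1)*k)).take (s+1)) := by
        funext k
        simp only [Function.comp, Nat.succ_eq_add_one]
        have e : (s+1)*(k+1) = ((s+1)*k + s) + 1 := by ring
        rw [e, List.drop_succ_cons, List.drop_drop, Nat.add_comm ((s+1)*k) s]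
      rw [hcomp]
      have hih := ih (t.drop s) (by
        simp only [List.length_drop]
        simp only [List.length_cons] at hl
        omega)
      simp only [List.length_drop] at hih
      rw [hih, chunkSum_cons]

theorem foldl_body_eq (l : List Int) (S : Int) (r : List Int) (acc : Int) :
    r.foldl (fun total_cost seg_start =>
      let seg_end := min (seg_start + S) (l.length : Int)
      let segment := PySem.List.slice l (some seg_start) (some seg_end)
      if segment.length = 0 then total_cost
      else if segment.length = 1 then
        total_cost + bit_cost [PySem.List.pyGetD segment 0 0]
      else
        let anchor_bits := bit_cost [PySem.List.pyGetD segment 0 0]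
        let diff_bits := bit_cost [PySem.List.pyGetD segment 1 0 - PySem.List.pyGetD segment 0 0]
        let dods := (PySem.List.pyRange 2 (segment.length : Int)).foldl (fun ds i =>
          let d1 := PySem.List.pyGetD segment i 0 - PySem.List.pyGetD segment (i-1) 0
          let d0 := PySem.List.pyGetD segment (i-1) 0 - PySem.List.pyGetD segment (i-2) 0
          ds ++ [d1 - d0]) []
        let dod_cost := if dods ≠ [] then bit_cost dods * (dods.length : Int) else 0
        total_cost + anchor_bits + diff_bits + dod_cost) acc
    = acc + (r.map (fun st => segCost (PySem.List.slice l (some st)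
        (some (min (st + S) (l.length : Int)))))).sum := by
  have hb : (fun (total_cost seg_start : Int) =>
      let seg_end := min (seg_start + S) (l.length : Int)
      let segment := PySem.List.slice l (some seg_start) (some seg_end)
      if segment.length = 0 then total_cost
      else if segment.length = 1 then
        total_cost + bit_cost [PySem.List.pyGetD segment 0 0]
      else
        let anchor_bits := bit_cost [PySem.List.pyGetD segment 0 0]
        let diff_bits := bit_cost [PySem.List.pyGetD segment 1 0 - PySem.List.pyGetD segment 0 0]
        let dods := (PySem.List.pyRange 2 (segment.length : Int)).foldl (fun ds i =>
          let d1 := PySem.List.pyGetD segment i 0 - PySem.List.pyGetD segment (i-1) 0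
          let d0 := PySem.List.pyGetD segment (i-1) 0 - PySem.List.pyGetD segment (i-2) 0
          ds ++ [d1 - d0]) []
        let dod_cost := if dods ≠ [] then bit_cost dods * (dods.length : Int) else 0
        total_cost + anchor_bits + diff_bits + dod_cost)
      = fun acc st => acc + segCost (PySem.List.slice l (some st)
          (some (min (st + S) (l.length : Int)))) := by
    funext acc st
    exact perSeg acc _
  rw [hb, PySem.List.foldl_add]

theorem A_eq_chunk (s : Nat) (l : List Int) :
    compute_segmented_dod_cost l ((s+1 : Nat) : Int) = chunkSum s l := by
  refine (foldl_body_eq l ((s+1 : Nat) : Int) _ 0).trans ?_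
  rw [zero_add]
  have hSpos : (0:Int) < ((s+1 : Nat) : Int) := by exact_mod_cast Nat.succ_pos s
  have hr : PySem.List.pyRange 0 (l.length : Int) ((s+1 : Nat) : Int)
      = (List.range ((l.length + s)/(s+1))).map (fun k => (((s+1)*k : Nat) : Int)) := by
    rw [PySem.List.pyRange_of_pos _ _ hSpos]
    rcases Nat.eq_zero_or_pos l.length with h0 | hpos
    · rw [h0]
      rw [if_neg (by norm_num)]
      rw [Nat.div_eq_of_lt (by omega)]
      simp
    · rw [if_pos (by exact_mod_cast hpos)]
      have hdiv : (((l.length : Int) - 0 + ((s+1 : Nat) : Int) - 1) / ((s+1 : Nat) : Int)).toNat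
          = (l.length + s)/(s+1) := by
        have e : ((l.length : Int) - 0 + ((s+1 : Nat) : Int) - 1) = ((l.length + s : Nat) : Int) := by
          push_cast; ring
        rw [e, ← Int.natCast_div]
        exact Int.toNat_natCast _
      rw [hdiv]
      apply List.map_congr_left
      intro k _
      push_cast
      ring
  rw [hr, List.map_map]
  have hfun : ((fun st => segCost (PySem.List.slice l (some st)
        (some (min (st + ((s+1 : Nat) : Int)) (l.length : Int))))) ∘ (fun k => (((s+1)*k : Nat) : Int)))
      = fun k => segCost ((l.drop ((s+1)*k)).take (s+1)) := by
    funext k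
    simp only [Function.comp]
    rw [slice_chunk]
  rw [hfun]
  exact range_chunk s l.length l le_rfl

-- --- B's streaming state after an unfinished segment prefix x :: b0 :: q ---

def midSt (T x b0 : Int) (q : List Int) : BSt :=
  { total := T, pos := 2 + (q.length : Int), first := x, diffc := cost1 |b0 - x|,
    maxdod := (segDods x b0 q).foldl (fun m d => if |d| > m then |d| else m) 0,
    cnt := (q.length : Int),
    prev := (b0 :: q).getLastD 0,
    prev2 := (x :: (b0 :: q).dropLast).getLastD 0,
    has_diff := true }

def bRun (S : Int) (l : List Int) (st : BSt) : Int :=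
  let fin := l.foldl (bStep S) st
  if fin.pos ≠ 0 then bFlush fin else fin.total

theorem bRun_nil (S : Int) (st : BSt) :
    bRun S [] st = if st.pos ≠ 0 then bFlush st else st.total := rfl

theorem bRun_cons (S x : Int) (t : List Int) (st : BSt) :
    bRun S (x :: t) st = bRun S t (bStep S st x) := rfl

theorem getLastD_irrel (a : Int) (l : List Int) (d d' : Int) :
    (a :: l).getLastD d = (a :: l).getLastD d' := by
  cases l with
  | nil => rfl
  | cons b l => simp only [List.getLastD_cons]

theorem foldMax_congr (t : List Int) : ∀ m : Int, 0 ≤ m →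
    t.foldl (fun m d => if |d| > m then |d| else m) m = t.foldl (fun m w => max m |w|) m := by
  induction t with
  | nil => intro m _; rfl
  | cons d t ih =>
    intro m hm
    simp only [List.foldl_cons]
    have he : (if |d| > m then |d| else m) = max m |d| := by
      rcases le_or_gt |d| m with h | h
      · rw [if_neg (by omega), max_eq_left h]
      · rw [if_pos h, max_eq_right (le_of_lt h)]
    rw [he, ih (max m |d|) (le_trans hm (le_max_left _ _))]

theorem foldMax0_eq_maxAbs (h : Int) (t : List Int) :
    (h :: t).foldl (fun m d => if |d| > m then |d| else m) 0 = maxAbs (h :: t) := by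
  simp only [List.foldl_cons]
  have : (if |h| > 0 then |h| else 0) = |h| := by
    rcases eq_or_lt_of_le (abs_nonneg h) with h0 | h0
    · rw [if_neg (by omega), ← h0]
    · rw [if_pos h0]
  rw [this, foldMax_congr t |h| (abs_nonneg h)]
  rfl

theorem segCost_one (a : Int) : segCost [a] = cost1 |a| := rfl
theorem segCost_cons2 (a b : Int) (t : List Int) :
    segCost (a :: b :: t) = cost1 |a| + cost1 |b - a| +
      (if segDods a b t = [] then 0
       else cost1 (maxAbs (segDods a b t)) * ((segDods a b t).length : Int)) := rfl

theorem bFlush_mid (T x b0 : Int) (q : List Int) :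
    bFlush (midSt T x b0 q) = T + segCost (x :: b0 :: q) := by
  rw [segCost_cons2]
  simp only [bFlush, midSt]
  rcases hq : segDods x b0 q with _ | ⟨d, ds⟩
  · have hq0 : q = [] := by
      cases q with
      | nil => rfl
      | cons a r => simp [segDods] at hq
    subst hq0
    simp [segDods]
    ring
  · have hql : q.length = ds.length + 1 := by
      have hsl := segDods_length x b0 q
      rw [hq] at hsl
      simp at hsl
      omega
    simp only [if_true, ne_eq]
    rw [foldMax0_eq_maxAbs, if_pos (show ¬ ((q.length : Int) = 0) by omega),
      if_neg (show ¬ (d :: ds = []) by simp)]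
    have hc : ((q.length : Nat) : Int) = (((d :: ds).length : Nat) : Int) := by
      simp [hql]
    rw [hc]
    ring

theorem segDods_snoc (c : Int) : ∀ (x b0 : Int) (q : List Int),
    segDods x b0 (q ++ [c]) = segDods x b0 q ++
      [c - 2 * ((b0 :: q).getLastD 0) + ((x :: (b0 :: q).dropLast).getLastD 0)] := by
  intro x b0 q
  induction q generalizing x b0 with
  | nil => simp [segDods]
  | cons d q ih =>
    simp only [List.cons_append, segDods]
    rw [ih b0 d]
    have h1 : (b0 :: d :: q).getLastD 0 = (d :: q).getLastD 0 := by
      rw [List.getLastD_cons]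
      exact getLastD_irrel d q b0 0
    have h2 : (x :: (b0 :: d :: q).dropLast).getLastD 0 = (b0 :: (d :: q).dropLast).getLastD 0 := by
      rw [List.dropLast_cons₂, List.getLastD_cons]
      exact getLastD_irrel b0 _ x 0
    rw [h1, h2]

theorem bStep_mid (s : Nat) (T x b0 c : Int) (q : List Int) :
    bStep ((s+1 : Nat) : Int) (midSt T x b0 q) c =
      (if q.length + 2 = s
       then { midSt T x b0 (q ++ [c]) with
              total := bFlush (midSt T x b0 (q ++ [c])), pos := 0 }
       else midSt T x b0 (q ++ [c])) := by
  have hprev : (b0 :: (q ++ [c])).getLastD 0 = c := by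
    rw [← List.cons_append, List.getLastD_concat]
  have hprev2 : (x :: (b0 :: (q ++ [c])).dropLast).getLastD 0 = (b0 :: q).getLastD 0 := by
    rw [← List.cons_append, List.dropLast_concat, List.getLastD_cons]
    exact getLastD_irrel b0 q x 0
  have hdods : (segDods x b0 (q ++ [c])).foldl (fun m d => if |d| > m then |d| else m) 0
      = (fun m d => if |d| > m then |d| else m)
          ((segDods x b0 q).foldl (fun m d => if |d| > m then |d| else m) 0)
          (c - 2 * ((b0 :: q).getLastD 0) + ((x :: (b0 :: q).dropLast).getLastD 0)) := by
    rw [segDods_snoc, List.foldl_append, List.foldl_cons, List.foldl_nil]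
  simp only [bStep, midSt]
  rw [if_neg (show ¬(2 + (q.length:Int) = 0) by omega),
      if_neg (show ¬(2 + (q.length:Int) = 1) by omega)]
  dsimp only
  by_cases hb : q.length + 2 = s
  · rw [if_pos (show 2 + (q.length:Int) + 1 = ((s+1:Nat):Int) by push_cast; omega),
      if_pos hb]
    simp only [bFlush, midSt, hprev, hprev2, hdods, BSt.mk.injEq, List.length_append,
      List.length_cons, List.length_nil]
    simp
  · rw [if_neg (show ¬(2 + (q.length:Int) + 1 = ((s+1:Nat):Int)) by push_cast; omega),
      if_neg hb]
    simp only [midSt, hprev, hprev2, hdods, BSt.mk.injEq, List.length_append,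
      List.length_cons, List.length_nil]
    simp
    omega

theorem B_main (s : Nat) : ∀ n : Nat,
    (∀ (l : List Int) (st : BSt), l.length ≤ n → st.pos = 0 →
      bRun ((s+1 : Nat) : Int) l st = st.total + chunkSum s l) ∧
    (∀ (u q : List Int) (T x b0 : Int), u.length ≤ n → q.length + 2 ≤ s →
      bRun ((s+1 : Nat) : Int) u (midSt T x b0 q)
        = T + segCost (x :: b0 :: (q ++ u.take (s - 1 - q.length)))
          + chunkSum s (u.drop (s - 1 - q.length))) := by
  intro n
  induction n using Nat.strong_induction_on with
  | _ n ih =>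
    constructor
    · intro l st hl hpos
      rcases l with _ | ⟨x, t⟩
      · rw [bRun_nil, if_neg (by simp [hpos]), chunkSum_nil, add_zero]
      · have hn1 : 1 ≤ n := by simp at hl; omega
        obtain ⟨T, p, fs, dc, md, cn, pv, pv2, hd⟩ := st
        simp only at hpos
        subst hpos
        rw [bRun_cons]
        by_cases hs0 : s = 0
        · subst hs0
          have hstep : bStep ((0+1 : Nat) : Int) ⟨T, 0, fs, dc, md, cn, pv, pv2, hd⟩ x
              = ⟨T + cost1 |x|, 0, x, dc, 0, 0, x, pv, false⟩ := by
            simp [bStep, bFlush]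
          rw [hstep, (ih (n-1) (by omega)).1 t _ (by simp at hl; omega) rfl]
          rw [chunkSum_cons]
          simp only [List.take_zero, List.drop_zero, segCost_one]
          ring
        · have hstep : bStep ((s+1 : Nat) : Int) ⟨T, 0, fs, dc, md, cn, pv, pv2, hd⟩ x
              = ⟨T, 1, x, dc, 0, 0, x, pv, false⟩ := by
            simp [bStep, hs0]
          rw [hstep]
          rcases t with _ | ⟨b0, t'⟩
          · rw [bRun_nil, if_pos (by norm_num), chunkSum_cons]
            simp [bFlush, chunkSum_nil, segCost_one]
          · rw [bRun_cons]
            by_cases hs1 : s = 1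
            · subst hs1
              have hstep2 : bStep ((1+1 : Nat) : Int) ⟨T, 1, x, dc, 0, 0, x, pv, false⟩ b0
                  = ⟨T + cost1 |x| + cost1 |b0 - x|, 0, x, cost1 |b0 - x|, 0, 0, b0, x, true⟩ := by
                simp [bStep, bFlush]
              rw [hstep2, (ih (n-1) (by omega)).1 t' _ (by simp at hl; omega) rfl]
              rw [chunkSum_cons]
              simp only [List.take_succ_cons, List.take_zero, List.drop_succ_cons,
                List.drop_zero, segCost_cons2, segDods]
              simp
              ring
            · have hs2 : 2 ≤ s := by omega
              have hstep2 : bStep ((s+1 : Nat) : Int) ⟨T, 1, x, dc, 0, 0, x, pv, false⟩ b0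
                  = midSt T x b0 [] := by
                have hne2 : ¬((2:Int) = (s:Int) + 1) := by omega
                simp [bStep, midSt, segDods, hne2]
              rw [hstep2,
                (ih (n-1) (by omega)).2 t' [] T x b0 (by simp at hl ⊢; omega) (by simp; omega)]
              rw [chunkSum_cons]
              obtain ⟨s', rfl⟩ : ∃ s', s = s' + 1 := ⟨s - 1, by omega⟩
              simp only [List.take_succ_cons, List.drop_succ_cons, List.length_nil,
                Nat.add_sub_cancel, List.nil_append, Nat.sub_zero]
              ring
    · intro u q T x b0 hu hq
      rcases u with _ | ⟨c, u'⟩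
      · rw [bRun_nil, if_pos (by simp [midSt]; omega), bFlush_mid]
        simp [chunkSum_nil]
      · rw [bRun_cons, bStep_mid]
        by_cases hb : q.length + 2 = s
        · rw [if_pos hb]
          rw [(ih (n-1) (by simp at hu; omega)).1 u' _ (by simp at hu; omega) rfl]
          simp only [bFlush_mid]
          have he : s - 1 - q.length = 1 := by omega
          rw [he]
          simp only [List.take_succ_cons, List.take_zero, List.drop_succ_cons, List.drop_zero]
        · rw [if_neg hb]
          have hq3 : (q ++ [c]).length + 2 ≤ s := by simp; omega
          rw [(ih (n-1) (by simp at hu; omega)).2 u' (q ++ [c]) T x b0 (by simp at hu; omega) hq3]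
          have he : s - 1 - q.length = (s - 1 - (q ++ [c]).length) + 1 := by simp; omega
          rw [he]
          simp only [List.take_succ_cons, List.drop_succ_cons]
          rw [← List.append_cons]

theorem B_eq_chunk (s : Nat) (l : List Int) :
    compute_segmented_dod_cost_alt l ((s+1 : Nat) : Int) = chunkSum s l := by
  have h := (B_main s l.length).1 l ⟨0, 0, 0, 0, 0, 0, 0, 0, false⟩ le_rfl rfl
  simpa using h

-- ===== VERDICT (by name: the statement is the Claim_ definition above) =====
theorem compute_segmented_dod_cost_spec : Claim_equal_compute_segmented_dod_cost := by
  intro column seg_size hdom hpre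
  have h1 : 1 ≤ seg_size := hpre
  obtain ⟨s, rfl⟩ : ∃ s : Nat, seg_size = ((s+1 : Nat) : Int) :=
    ⟨(seg_size - 1).toNat, by push_cast; omega⟩
  unfold Spec_compute_segmented_dod_cost
  rw [A_eq_chunk, B_eq_chunk]
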